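-- pv_equiv track=rewrite | github.com/ValaryLim/finsearchIE | dyfinie/baselines/srl/srl_prediction.py | format_pred_tags
-- ===== SOURCE A (Python) =====
-- def extract_tag(tag):
--     if 'ARG0' in tag:
--         return 0
--     elif 'ARG1' in tag:
--         return 1
--     else:
--         return -1
--
-- def clean_pred_tags(gold_tags):
--     prev, left_tags, right_tags = -1, gold_tags.copy(), gold_tags.copy()
--
--     # left pass
--     for i in range(len(gold_tags)):
--         if gold_tags[i] == None:
--             left_tags[i] = prev
--         else:
--             left_tags[i] = gold_tags[i]
--             prev = gold_tags[i]
--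
--     # right pass
--     prev = -1
--
--     for i in range(len(gold_tags)-1, -1, -1):
--         if gold_tags[i] == None:
--             right_tags[i] = prev
--         else:
--             right_tags[i] = gold_tags[i]
--             prev = gold_tags[i]
--
--     cleaned_tags = []
--     for i in range(len(gold_tags)):
--         if left_tags[i] == right_tags[i]:
--             cleaned_tags.append(left_tags[i])
--         else:
--             cleaned_tags.append(-1)
--
--     return cleaned_tags
--
-- def format_pred_tags(gold_toks, pred_toks, pred_tags):
--     '''
--     Parameters:
--         gold_toks: tokens from gold-standard labels
--         pred_toks: tokens extracted by model
--         pred_tags: tags predicted by model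
--
--     Returns:
--         gold_tags: tags predicted by model with index matched to gold_toks
--     '''
--     # extract gold tags
--     offset = 0
--     gold_tags = []
--     for i in range(len(pred_toks)):
--         if pred_toks[i] == gold_toks[i + offset]:
--             gold_tags.append(extract_tag(pred_tags[i]))
--         else:
--             while pred_toks[i] != gold_toks[i + offset]:
--                 offset += 1
--                 gold_tags.append(None)
--             gold_tags.append(extract_tag(pred_tags[i]))
--
--     # clean gold tags by eliminating all "None" instances
--     cleaned_tags = clean_pred_tags(gold_tags)
--
--     return cleaned_tags
-- ===== SOURCE B (Python) =====
-- def _tag_value(tag):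
--     if 'ARG0' in tag:
--         return 0
--     if 'ARG1' in tag:
--         return 1
--     return -1
--
-- def format_pred_tags(gold_toks, pred_toks, pred_tags):
--     # align predicted tags to gold tokens (gaps are None)
--     aligned = []
--     j = 0
--     for tok, tag in zip(pred_toks, pred_tags):
--         while gold_toks[j] != tok:
--             aligned.append(None)
--             j += 1
--         aligned.append(_tag_value(tag))
--         j += 1
--     # single forward pass: fill each run of Nones from its two neighbours
--     out = []
--     last = -1
--     i, n = 0, len(aligned)
--     while i < n:
--         v = aligned[i]
--         if v is not None:
--             out.append(v)
--             last = v
--             i += 1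
--         else:
--             k = i
--             while k < n and aligned[k] is None:
--                 k += 1
--             nxt = aligned[k] if k < n else -1
--             out.extend([last if last == nxt else -1] * (k - i))
--             i = k
--     return out
-- ===== Notes on version B (the rewrite author's own statement) =====
-- stated objective: alternative
-- what changed: clean_pred_tags's two directional sweeps (left fill, right fill) plus an element-wise merge are replaced by a single forward pass over the aligned tags that fills each run of Nones at once from its two neighbouring values; the alignment loop iterates zip(pred_toks, pred_tags) with one gold pointer instead of index+offset arithmetic.
import Mathlib
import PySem

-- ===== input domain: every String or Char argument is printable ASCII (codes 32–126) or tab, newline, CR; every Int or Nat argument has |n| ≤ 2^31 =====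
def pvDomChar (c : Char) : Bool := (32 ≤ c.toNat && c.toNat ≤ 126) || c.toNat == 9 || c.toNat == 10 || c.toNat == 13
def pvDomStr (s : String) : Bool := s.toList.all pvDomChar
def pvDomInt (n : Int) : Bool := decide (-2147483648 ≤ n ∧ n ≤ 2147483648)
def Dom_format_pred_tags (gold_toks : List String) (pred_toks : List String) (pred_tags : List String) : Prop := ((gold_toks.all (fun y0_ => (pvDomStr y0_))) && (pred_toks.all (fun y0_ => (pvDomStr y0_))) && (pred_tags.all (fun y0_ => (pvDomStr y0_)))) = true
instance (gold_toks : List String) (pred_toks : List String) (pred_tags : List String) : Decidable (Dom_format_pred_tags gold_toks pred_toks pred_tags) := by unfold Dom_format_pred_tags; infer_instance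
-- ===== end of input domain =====

-- B replaces A's two directional sweeps plus element-wise merge by one forward
-- gap-segment pass (objective: alternative decomposition; return value only).

-- ===== PORT A =====
def extractTagA (tag : String) : Int :=
  if PySem.Str.isIn "ARG0" tag then 0
  else if PySem.Str.isIn "ARG1" tag then 1
  else -1

-- the `while pred_toks[i] != gold_toks[i+offset]` search: first index ≥ j holding p
def findFromA (gold : List String) (p : String) (j : Nat) : Option Nat :=
  if h : j < gold.length then
    if gold[j] = p then some j else findFromA gold p (j + 1)
  else none   -- Python raises IndexError here
termination_by gold.length - j

-- the alignment loop of format_pred_tags (i, offset ⇒ j = i + offset)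
def alignA (gold : List String) : List String → List String → Nat → List (Option Int)
  | [], _, _ => []
  | _ :: _, [], _ => []          -- pred_tags[i]: IndexError
  | p :: ps, tg :: ts, j =>
    if PySem.List.pyGet? gold (j : Int) = some p then
      some (extractTagA tg) :: alignA gold ps ts (j + 1)
    else
      match findFromA gold p (j + 1) with
      | none => []               -- while loop runs past the end: IndexError
      | some k => List.replicate (k - j) none ++ some (extractTagA tg) :: alignA gold ps ts (k + 1)

-- loop body shared by the left and the right pass of clean_pred_tags
def leftStepA (st : Int × List Int) (x : Option Int) : Int × List Int :=
  match x with
  | none => (st.1, st.1 :: st.2)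
  | some v => (v, v :: st.2)

def clean_pred_tagsA (gs : List (Option Int)) : List Int :=
  let left := (gs.foldl leftStepA (-1, [])).2.reverse
  let right := (gs.reverse.foldl leftStepA (-1, [])).2
  List.zipWith (fun a b => if a = b then a else -1) left right

def format_pred_tags (gold_toks : List String) (pred_toks : List String) (pred_tags : List String) : List Int :=
  clean_pred_tagsA (alignA gold_toks pred_toks pred_tags 0)

-- ===== PORT B =====
def extractTagB (tag : String) : Int :=
  if PySem.Str.isIn "ARG0" tag then 0
  else if PySem.Str.isIn "ARG1" tag then 1
  else -1

-- Source B's inner `while gold_toks[j] != tok` scan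
def seekB (gold : List String) (p : String) (j : Nat) : Option Nat :=
  if h : j < gold.length then
    if gold[j] = p then some j else seekB gold p (j + 1)
  else none   -- Python raises IndexError here
termination_by gold.length - j

-- Source B's `for tok, tag in zip(...)` alignment loop
def alignB (gold : List String) : List (String × String) → Nat → List (Option Int)
  | [], _ => []
  | (p, tg) :: rest, j =>
    match seekB gold p j with
    | none => []                 -- IndexError
    | some k => List.replicate (k - j) none ++ some (extractTagB tg) :: alignB gold rest (k + 1)

-- `while k < n and aligned[k] is None: k += 1`: length of the None-run and the rest
def countNonesB : List (Option Int) → Nat × List (Option Int)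
  | [] => (0, [])
  | none :: t => ((countNonesB t).1 + 1, (countNonesB t).2)
  | some v :: t => (0, some v :: t)

theorem countNonesB_len (l : List (Option Int)) : (countNonesB l).2.length ≤ l.length := by
  induction l with
  | nil => simp [countNonesB]
  | cons x t ih => cases x <;> simp [countNonesB] <;> omega

-- `aligned[k] if k < n else -1`
def nextValB : List (Option Int) → Int
  | some v :: _ => v
  | _ => -1

-- Source B's single forward gap-fill pass
def gapFillB (last : Int) : List (Option Int) → List Int
  | [] => []
  | some v :: t => v :: gapFillB v t
  | none :: t =>
    let p := countNonesB t
    let f := if last = nextValB p.2 then last else -1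
    f :: (List.replicate p.1 f ++ gapFillB last p.2)
termination_by l => l.length
decreasing_by all_goals (have := countNonesB_len t; simp only [List.length_cons]; omega)

def format_pred_tags_alt (gold_toks : List String) (pred_toks : List String) (pred_tags : List String) : List Int :=
  gapFillB (-1) (alignB gold_toks (pred_toks.zip pred_tags) 0)

-- ===== PRECONDITION & SPEC =====
-- Pre_ excludes exactly the inputs on which Python A raises IndexError: the predicted
-- tokens must embed (as a subsequence) into the gold tokens, and there must be a tag
-- for every predicted token.
def Pre_format_pred_tags (gold_toks : List String) (pred_toks : List String) (pred_tags : List String) : Prop :=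
  pred_toks.Sublist gold_toks ∧ pred_toks.length ≤ pred_tags.length
instance (gold_toks : List String) (pred_toks : List String) (pred_tags : List String) : Decidable (Pre_format_pred_tags gold_toks pred_toks pred_tags) := by unfold Pre_format_pred_tags; infer_instance

def pvWitness_format_pred_tags : List String × List String × List String :=
  (["the", "cat", "sat", "down"], ["cat", "down"], ["B-ARG0", "I-ARG1"])

def Spec_format_pred_tags (gold_toks : List String) (pred_toks : List String) (pred_tags : List String) (out : List Int) : Prop := out = format_pred_tags_alt gold_toks pred_toks pred_tags
instance (gold_toks : List String) (pred_toks : List String) (pred_tags : List String) (out : List Int) : Decidable (Spec_format_pred_tags gold_toks pred_toks pred_tags out) := by unfold Spec_format_pred_tags; infer_instance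

-- ===== CLAIM (what is proved, stated in full; the proofs are below) =====
def Claim_equal_format_pred_tags : Prop := ∀ (gold_toks : List String) (pred_toks : List String) (pred_tags : List String), Dom_format_pred_tags gold_toks pred_toks pred_tags → Pre_format_pred_tags gold_toks pred_toks pred_tags → Spec_format_pred_tags gold_toks pred_toks pred_tags (format_pred_tags gold_toks pred_toks pred_tags)

-- ===== LEMMAS AND PROOFS =====

theorem extract_eq (tg : String) : extractTagA tg = extractTagB tg := rfl

theorem findFromA_eq_seekB (gold : List String) (p : String) (j : Nat) :
    findFromA gold p j = seekB gold p j := by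
  fun_induction findFromA gold p j with
  | case1 j h heq => rw [seekB]; simp [h, heq]
  | case2 j h heq ih => rw [seekB]; simp [h, heq, ih]
  | case3 j h => rw [seekB]; simp [h]

theorem align_eq (gold : List String) (ps ts : List String) (j : Nat) :
    alignA gold ps ts j = alignB gold (ps.zip ts) j := by
  induction ps generalizing ts j with
  | nil => cases ts <;> simp [alignA, alignB]
  | cons p ps ih =>
    cases ts with
    | nil => simp [alignA, alignB]
    | cons tg ts =>
      simp only [List.zip_cons_cons, alignA, alignB]
      by_cases hg : PySem.List.pyGet? gold (j : Int) = some p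
      · have hj : j < gold.length := by
          by_contra hj
          rw [PySem.List.pyGet?_natCast,
            List.getElem?_eq_none (by omega : gold.length ≤ j)] at hg
          simp at hg
        have hgj : gold[j] = p := by
          rw [PySem.List.pyGet?_natCast, List.getElem?_eq_getElem hj] at hg
          exact Option.some.inj hg
        rw [seekB]
        simp [hj, hgj, ih, extract_eq]
      · rw [seekB]
        by_cases hj : j < gold.length
        · have hgj : ¬ gold[j] = p := by
            intro hcon
            apply hg
            rw [PySem.List.pyGet?_natCast, List.getElem?_eq_getElem hj, hcon]
          simp only [hg, if_false, hj, dif_pos, hgj, if_false, ← findFromA_eq_seekB]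
          cases findFromA gold p (j + 1) <;> simp [ih, extract_eq]
        · have hg' : ¬ PySem.List.pyGet? gold (j : Int) = some p := hg
          have hf : findFromA gold p (j + 1) = none := by
            rw [findFromA, dif_neg (by omega)]
          simp [hj, hf]

-- proof-side characterisations of the two sweeps
def leftFrom (prev : Int) : List (Option Int) → List Int
  | [] => []
  | none :: t => prev :: leftFrom prev t
  | some v :: t => v :: leftFrom v t

def nextSome : List (Option Int) → Int
  | [] => -1
  | some v :: _ => v
  | none :: t => nextSome t

def rightFrom : List (Option Int) → List Int
  | [] => []
  | some v :: t => v :: rightFrom t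
  | none :: t => nextSome t :: rightFrom t

theorem left_fold_eq (gs : List (Option Int)) (prev : Int) (acc : List Int) :
    ((gs.foldl leftStepA (prev, acc)).2).reverse = acc.reverse ++ leftFrom prev gs := by
  induction gs generalizing prev acc with
  | nil => simp [leftFrom]
  | cons x t ih => cases x <;> simp [leftStepA, leftFrom, ih]

theorem right_foldr_eq (gs : List (Option Int)) :
    gs.foldr (fun x st => leftStepA st x) (-1, []) = (nextSome gs, rightFrom gs) := by
  induction gs with
  | nil => simp [nextSome, rightFrom]
  | cons x t ih =>
    cases x <;> rw [List.foldr_cons, ih] <;> simp [leftStepA, nextSome, rightFrom]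

theorem cleanA_eq_zip (gs : List (Option Int)) :
    clean_pred_tagsA gs =
      List.zipWith (fun a b => if a = b then a else -1) (leftFrom (-1) gs) (rightFrom gs) := by
  unfold clean_pred_tagsA
  rw [List.foldl_reverse, right_foldr_eq]
  have := left_fold_eq gs (-1) []
  simp at this
  simp [this]

theorem nextSome_eq_nextVal (t : List (Option Int)) :
    nextSome t = nextValB (countNonesB t).2 := by
  induction t with
  | nil => simp [nextSome, countNonesB, nextValB]
  | cons x t ih => cases x <;> simp [nextSome, countNonesB, nextValB, ih]

theorem run_lemma (t : List (Option Int)) (prev : Int) :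
    List.zipWith (fun a b => if a = b then a else -1) (leftFrom prev t) (rightFrom t) =
      List.replicate (countNonesB t).1 (if prev = nextValB (countNonesB t).2 then prev else -1) ++
        List.zipWith (fun a b => if a = b then a else -1)
          (leftFrom prev (countNonesB t).2) (rightFrom (countNonesB t).2) := by
  induction t with
  | nil => simp [countNonesB]
  | cons x t ih =>
    cases x with
    | some v => simp [countNonesB]
    | none =>
      simp only [countNonesB, leftFrom, rightFrom, List.zipWith_cons_cons, List.replicate_succ,
        List.cons_append, ih, nextSome_eq_nextVal]
      rfl

theorem zip_eq_gapFill (gs : List (Option Int)) (prev : Int) :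
    List.zipWith (fun a b => if a = b then a else -1) (leftFrom prev gs) (rightFrom gs) =
      gapFillB prev gs := by
  fun_induction gapFillB prev gs with
  | case1 prev => simp [leftFrom, rightFrom]
  | case2 prev v t ih =>
    simp [leftFrom, rightFrom, ← ih]
  | case3 prev t p f ih =>
    simp only [leftFrom, rightFrom, List.zipWith_cons_cons, run_lemma t prev,
      nextSome_eq_nextVal, ih, p, f, dite_eq_ite]

-- ===== VERDICT (by name: the statement is the Claim_ definition above) =====
theorem format_pred_tags_spec : Claim_equal_format_pred_tags := by
  intro gold pred tags _ _
  unfold Spec_format_pred_tags format_pred_tags format_pred_tags_alt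
  rw [align_eq, cleanA_eq_zip, zip_eq_gapFill]
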